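-- pv_equiv track=rewrite | github.com/Landcruiser87/AoC2022 | day_10/day_10.py | calc_part_A
-- ===== SOURCE A (Python) =====
-- from collections import deque
--
-- def calc_part_A(data:list):
-- 	register = 1
-- 	cycle_c = sig_strength = 0
-- 	sig_marker = list(range(20, 260, 40))
-- 	com_que = deque(data)
--
-- 	while com_que:
-- 		command = com_que.popleft()
-- 		if command[0] == 'noop':
-- 			cycle_c += 1
-- 		else:
-- 			cycle_c += 2
--
-- 		if any(cycle_c >= x for x in sig_marker if sig_marker):
-- 			sig_strength += sig_marker[0]*register
-- 			sig_marker.pop(0)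
--
-- 		if command[0] != 'noop':
-- 			register += int(command[1])
--
-- 	return sig_strength
-- ===== SOURCE B (Python) =====
-- def calc_part_A(data: list):
--     register = 1
--     x_history = []
--     for command in data:
--         if command[0] == 'noop':
--             x_history.append(register)
--         else:
--             x_history.append(register)
--             x_history.append(register)
--             register += int(command[1])
--     return sum(m * x_history[m - 1] for m in range(20, 260, 40) if m - 1 < len(x_history))
-- ===== Notes on version B (the rewrite author's own statement) =====
-- stated objective: simpler
-- what changed: B replaces A's deque walk with inline marker popping (mutable sig_marker list, any()-scan, register updated after the check) by a two-phase decomposition: first build the full per-cycle register timeline, then sum the six fixed signal cycles by direct index lookup.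
import Mathlib
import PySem

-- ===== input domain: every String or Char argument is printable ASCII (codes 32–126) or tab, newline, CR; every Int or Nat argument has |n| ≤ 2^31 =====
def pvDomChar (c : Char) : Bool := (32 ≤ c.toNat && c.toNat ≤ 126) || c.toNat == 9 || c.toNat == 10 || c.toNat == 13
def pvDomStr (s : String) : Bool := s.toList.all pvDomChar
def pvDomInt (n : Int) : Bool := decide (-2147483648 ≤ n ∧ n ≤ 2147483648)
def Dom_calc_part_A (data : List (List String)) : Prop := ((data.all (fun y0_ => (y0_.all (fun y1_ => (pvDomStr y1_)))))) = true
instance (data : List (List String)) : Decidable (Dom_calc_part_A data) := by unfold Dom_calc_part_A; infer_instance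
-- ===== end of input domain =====

-- B builds the full per-cycle register timeline first and then reads the six fixed
-- signal cycles by index, instead of A's deque walk that pops the next marker inline
-- (objective: simpler decomposition; same cost).

-- ===== PORT A =====
-- command[0] / command[1] via pyGet? with a default; Pre_ guarantees the accesses and the
-- int() parse succeed, so the defaults are never taken on admitted inputs.
-- The redundant generator filter `if sig_marker` is vacuous (an empty list yields an empty
-- generator anyway) and is ported as plain List.any over the markers.
def goA : List (List String) → Int → Int → Int → List Int → Int
  | [], _, _, sig, _ => sig
  | cmd :: rest, register, cycleC, sig, markers =>
    let c0 := (PySem.List.pyGet? cmd 0).getD ""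
    let cycle' := if c0 = "noop" then cycleC + 1 else cycleC + 2
    let pop := markers.any (fun x => decide (cycle' ≥ x))
    let sig' := if pop then sig + markers.headD 0 * register else sig
    let markers' := if pop then markers.tail else markers
    let register' :=
      if c0 ≠ "noop" then
        register + (PySem.Int.ofStr? ((PySem.List.pyGet? cmd 1).getD "")).getD 0
      else register
    goA rest register' cycle' sig' markers'

def calc_part_A (data : List (List String)) : Int :=
  goA data 1 0 0 (PySem.List.pyRange 20 260 40)

-- ===== PORT B =====
-- the per-cycle timeline x_history: one entry per cycle holding the register value DURING
-- that cycle (addx contributes two entries before the register is updated)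
def buildHist : List (List String) → Int → List Int
  | [], _ => []
  | cmd :: rest, register =>
    if (PySem.List.pyGet? cmd 0).getD "" = "noop" then
      register :: buildHist rest register
    else
      register :: register ::
        buildHist rest (register + (PySem.Int.ofStr? ((PySem.List.pyGet? cmd 1).getD "")).getD 0)

def calc_part_A_alt (data : List (List String)) : Int :=
  let hist := buildHist data 1
  (PySem.List.pyRange 20 260 40).foldl
    (fun acc m =>
      if m - 1 < (hist.length : Int) then
        acc + m * (PySem.List.pyGet? hist (m - 1)).getD 0
      else acc) 0

-- ===== PRECONDITION & SPEC =====
-- Pre_ excludes exactly the inputs where A raises: an empty command (IndexError on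
-- command[0]), and a non-'noop' command whose second field is missing (IndexError) or is
-- not a valid int() literal (ValueError).
def Pre_calc_part_A (data : List (List String)) : Prop :=
  ∀ cmd ∈ data, cmd ≠ [] ∧
    (cmd.headD "" ≠ "noop" →
      2 ≤ cmd.length ∧ (PySem.Int.ofStr? (cmd.getD 1 "")).isSome = true)
instance (data : List (List String)) : Decidable (Pre_calc_part_A data) := by
  unfold Pre_calc_part_A; infer_instance

def pvWitness_calc_part_A : List (List String) := [["noop"], ["addx", "3"]]

def Spec_calc_part_A (data : List (List String)) (out : Int) : Prop := out = calc_part_A_alt data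
instance (data : List (List String)) (out : Int) : Decidable (Spec_calc_part_A data out) := by unfold Spec_calc_part_A; infer_instance

-- ===== CLAIM (what is proved, stated in full; the proofs are below) =====
def Claim_equal_calc_part_A : Prop := ∀ (data : List (List String)), Dom_calc_part_A data → Pre_calc_part_A data → Spec_calc_part_A data (calc_part_A data)

-- ===== LEMMAS AND PROOFS =====

-- the score a marker list still owes, measured from cycle count c, against timeline h
def scoreFrom (c : Int) : List Int → List Int → Int
  | [], _ => 0
  | m :: ms, h =>
    (if m - c ≤ (h.length : Int) then m * (PySem.List.pyGet? h (m - c - 1)).getD 0 else 0)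
      + scoreFrom c ms h

lemma scoreFrom_nil (c : Int) (ms : List Int) (hgt : ∀ m ∈ ms, c + 1 ≤ m) :
    scoreFrom c ms [] = 0 := by
  induction ms with
  | nil => rfl
  | cons m ms ih =>
    have hm := hgt m (by simp)
    simp only [scoreFrom, List.length_nil]
    rw [if_neg (by omega), ih (fun x hx => hgt x (by simp [hx]))]
    ring

lemma pyGet?_cons_of_one_le {α : Type} (a : α) (h : List α) (i : Int) (hi : 1 ≤ i) :
    PySem.List.pyGet? (a :: h) i = PySem.List.pyGet? h (i - 1) := by
  have h0 : i = ((i - 1).toNat : Int) + 1 := by omega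
  rw [h0, PySem.List.pyGet?_cons_succ, PySem.List.pyGet?_natCast,
      show ((i-1).toNat : Int) + 1 - 1 = ((i-1).toNat : Int) by ring,
      PySem.List.pyGet?_natCast]

lemma scoreFrom_shift (c a : Int) (ms h : List Int) (hm : ∀ m ∈ ms, c + 2 ≤ m) :
    scoreFrom c ms (a :: h) = scoreFrom (c + 1) ms h := by
  induction ms with
  | nil => rfl
  | cons m ms ih =>
    have h2 := hm m (by simp)
    simp only [scoreFrom, List.length_cons]
    rw [ih (fun x hx => hm x (by simp [hx]))]
    congr 1
    rw [pyGet?_cons_of_one_le a h (m - c - 1) (by omega)]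
    rw [show m - c - 1 - 1 = m - (c + 1) - 1 by omega]
    by_cases hle : m - (c + 1) ≤ (h.length : Int)
    · rw [if_pos (by push_cast; omega), if_pos hle]
    · rw [if_neg (by push_cast; omega), if_neg hle]

lemma goA_cons_noop (cmd : List String) (rest : List (List String)) (reg c sig : Int)
    (ms : List Int) (hn : (PySem.List.pyGet? cmd 0).getD "" = "noop") :
    goA (cmd :: rest) reg c sig ms =
      goA rest reg (c + 1)
        (if ms.any (fun x => decide (c + 1 ≥ x)) then sig + ms.headD 0 * reg else sig)
        (if ms.any (fun x => decide (c + 1 ≥ x)) then ms.tail else ms) := by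
  simp only [goA, hn, if_pos, ne_eq, not_true_eq_false, if_false]

lemma goA_cons_addx (cmd : List String) (rest : List (List String)) (reg c sig : Int)
    (ms : List Int) (hn : ¬ (PySem.List.pyGet? cmd 0).getD "" = "noop") :
    goA (cmd :: rest) reg c sig ms =
      goA rest (reg + (PySem.Int.ofStr? ((PySem.List.pyGet? cmd 1).getD "")).getD 0) (c + 2)
        (if ms.any (fun x => decide (c + 2 ≥ x)) then sig + ms.headD 0 * reg else sig)
        (if ms.any (fun x => decide (c + 2 ≥ x)) then ms.tail else ms) := by
  simp only [goA, hn, if_neg, ne_eq, not_false_eq_true, if_true]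

lemma buildHist_cons_noop (cmd : List String) (rest : List (List String)) (reg : Int)
    (hn : (PySem.List.pyGet? cmd 0).getD "" = "noop") :
    buildHist (cmd :: rest) reg = reg :: buildHist rest reg := by
  simp only [buildHist, hn, if_pos]

lemma buildHist_cons_addx (cmd : List String) (rest : List (List String)) (reg : Int)
    (hn : ¬ (PySem.List.pyGet? cmd 0).getD "" = "noop") :
    buildHist (cmd :: rest) reg =
      reg :: reg :: buildHist rest (reg + (PySem.Int.ofStr? ((PySem.List.pyGet? cmd 1).getD "")).getD 0) := by
  simp only [buildHist, hn, if_false]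

lemma any_marker_iff (m cyc : Int) (ms : List Int)
    (hms : ∀ x ∈ ms, cyc + 1 ≤ x) :
    ((m :: ms).any (fun x => decide (cyc ≥ x))) = decide (m ≤ cyc) := by
  simp only [List.any_cons, ge_iff_le]
  by_cases hc : m ≤ cyc
  · simp [hc]
  · simp only [decide_eq_false hc, Bool.false_or]
    rw [List.any_eq_false]
    intro x hx
    have := hms x hx
    simp; omega

lemma goA_eq (rest : List (List String)) :
    ∀ (reg c sig : Int) (ms : List Int),
      List.Pairwise (fun a b => a + 2 ≤ b) ms → (∀ m ∈ ms, c + 1 ≤ m) →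
      goA rest reg c sig ms = sig + scoreFrom c ms (buildHist rest reg) := by
  induction rest with
  | nil =>
    intro reg c sig ms _ hgt
    simp [goA, buildHist, scoreFrom_nil c ms hgt]
  | cons cmd rest ih =>
    intro reg c sig ms hp hgt
    by_cases hn : (PySem.List.pyGet? cmd 0).getD "" = "noop"
    · -- noop: one cycle
      rw [goA_cons_noop cmd rest reg c sig ms hn, buildHist_cons_noop cmd rest reg hn]
      cases ms with
      | nil =>
        simp only [List.any_nil, Bool.false_eq_true, if_false]
        rw [ih reg (c + 1) sig [] (by simp) (by simp)]
        rfl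
      | cons m ms =>
        have hm1 : c + 1 ≤ m := hgt m (by simp)
        have hms : ∀ x ∈ ms, m + 2 ≤ x := fun x hx => (List.pairwise_cons.mp hp).1 x hx
        rw [any_marker_iff m (c + 1) ms (fun x hx => by have := hms x hx; omega)]
        by_cases hc : m ≤ c + 1
        · -- marker crossed exactly now: m = c + 1
          rw [decide_eq_true hc]
          simp only [if_true, List.headD_cons, List.tail_cons]
          rw [ih reg (c + 1) (sig + m * reg) ms
              (List.pairwise_cons.mp hp).2
              (fun x hx => by have := hms x hx; omega)]
          simp only [scoreFrom, List.length_cons]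
          rw [scoreFrom_shift c reg ms (buildHist rest reg)
              (fun x hx => by have := hms x hx; omega)]
          rw [if_pos (by push_cast; omega)]
          rw [show m - c - 1 = (0:Int) by omega, PySem.List.pyGet?_zero_cons]
          simp; ring
        · rw [decide_eq_false hc]
          simp only [Bool.false_eq_true, if_false]
          rw [ih reg (c + 1) sig (m :: ms) hp
              (fun x hx => by
                rcases List.mem_cons.mp hx with h | h
                · omega
                · have := hms x h; omega)]
          rw [scoreFrom_shift c reg (m :: ms) (buildHist rest reg)
              (fun x hx => by
                rcases List.mem_cons.mp hx with h | h
                · omega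
                · have := hms x h; omega)]
    · -- addx: two cycles
      rw [goA_cons_addx cmd rest reg c sig ms hn, buildHist_cons_addx cmd rest reg hn]
      set v := (PySem.Int.ofStr? ((PySem.List.pyGet? cmd 1).getD "")).getD 0 with hv
      cases ms with
      | nil =>
        simp only [List.any_nil, Bool.false_eq_true, if_false]
        rw [ih (reg + v) (c + 2) sig [] (by simp) (by simp)]
        rfl
      | cons m ms =>
        have hm1 : c + 1 ≤ m := hgt m (by simp)
        have hms : ∀ x ∈ ms, m + 2 ≤ x := fun x hx => (List.pairwise_cons.mp hp).1 x hx
        rw [any_marker_iff m (c + 2) ms (fun x hx => by have := hms x hx; omega)]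
        by_cases hc : m ≤ c + 2
        · rw [decide_eq_true hc]
          simp only [if_true, List.headD_cons, List.tail_cons]
          rw [ih (reg + v) (c + 2) (sig + m * reg) ms
              (List.pairwise_cons.mp hp).2
              (fun x hx => by have := hms x hx; omega)]
          simp only [scoreFrom, List.length_cons]
          rw [scoreFrom_shift c reg ms (reg :: buildHist rest (reg + v))
              (fun x hx => by have := hms x hx; omega)]
          rw [scoreFrom_shift (c + 1) reg ms (buildHist rest (reg + v))
              (fun x hx => by have := hms x hx; omega)]
          rw [if_pos (by push_cast; omega)]
          have hget : (PySem.List.pyGet? (reg :: reg :: buildHist rest (reg + v)) (m - c - 1)).getD 0 = reg := by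
            by_cases h1 : m = c + 1
            · rw [show m - c - 1 = (0:Int) by omega, PySem.List.pyGet?_zero_cons]; rfl
            · rw [pyGet?_cons_of_one_le _ _ _ (by omega),
                  show m - c - 1 - 1 = (0:Int) by omega, PySem.List.pyGet?_zero_cons]
              rfl
          rw [hget, show c + 1 + 1 = c + 2 by ring]
          ring
        · rw [decide_eq_false hc]
          simp only [Bool.false_eq_true, if_false]
          rw [ih (reg + v) (c + 2) sig (m :: ms) hp
              (fun x hx => by
                rcases List.mem_cons.mp hx with h | h
                · omega
                · have := hms x h; omega)]
          rw [scoreFrom_shift c reg (m :: ms) (reg :: buildHist rest (reg + v))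
              (fun x hx => by
                rcases List.mem_cons.mp hx with h | h
                · omega
                · have := hms x h; omega)]
          rw [scoreFrom_shift (c + 1) reg (m :: ms) (buildHist rest (reg + v))
              (fun x hx => by
                rcases List.mem_cons.mp hx with h | h
                · omega
                · have := hms x h; omega)]
          rw [show c + 1 + 1 = c + 2 by ring]

lemma foldB_eq (h : List Int) (ms : List Int) :
    ∀ acc : Int,
      ms.foldl (fun acc m =>
        if m - 1 < (h.length : Int) then
          acc + m * (PySem.List.pyGet? h (m - 1)).getD 0
        else acc) acc = acc + scoreFrom 0 ms h := by
  induction ms with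
  | nil => intro acc; simp [scoreFrom]
  | cons m ms ih =>
    intro acc
    simp only [List.foldl_cons, scoreFrom]
    rw [ih]
    by_cases hc : m - 1 < (h.length : Int)
    · rw [if_pos hc, if_pos (by omega), show m - 0 - 1 = m - 1 by ring]
      ring
    · rw [if_neg hc, if_neg (by omega)]
      ring

-- ===== VERDICT (by name: the statement is the Claim_ definition above) =====
theorem calc_part_A_spec : Claim_equal_calc_part_A := by
  intro data _ _
  show calc_part_A data = calc_part_A_alt data
  have hR : PySem.List.pyRange 20 260 40 = [20, 60, 100, 140, 180, 220] := by decide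
  unfold calc_part_A calc_part_A_alt
  rw [hR]
  rw [goA_eq data 1 0 0 [20, 60, 100, 140, 180, 220] (by decide) (by decide)]
  rw [foldB_eq (buildHist data 1) [20, 60, 100, 140, 180, 220] 0]
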